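-- pv_equiv track=rewrite | github.com/somm12/Coding-Test | 4주차/순열추측하기.py | pascalSum
-- ===== SOURCE A (Python) =====
-- def pascalSum(res):
--     temp = []
--     while len(res) != 1:
--         for i in range(len(res)-1):
--             temp.append(res[i] + res[i+1])
--         res = temp.copy()
--         temp = []
--     return res[0]
-- ===== SOURCE B (Python) =====
-- def pascalSum(res):
--     # closed form: the repeated adjacent-sum collapse equals the binomial-weighted sum
--     # sum_i C(n-1, i) * res[i]; coefficients maintained multiplicatively in one pass.
--     n = len(res)
--     total = 0
--     c = 1
--     for i, x in enumerate(res):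
--         total += c * x
--         c = c * (n - 1 - i) // (i + 1)
--     return total
-- ===== Notes on version B (the rewrite author's own statement) =====
-- stated objective: faster
-- what changed: Replaces the O(n^2) repeated adjacent-sum collapsing loop by a single O(n) pass computing the closed form sum_i C(n-1,i)*res[i], with the binomial coefficients updated multiplicatively; Pre_ excludes the empty list, on which A loops forever.
-- outside the precondition, e.g. on pascalSum([]): A does not finish within the time limit, B returns 0
import Mathlib
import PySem

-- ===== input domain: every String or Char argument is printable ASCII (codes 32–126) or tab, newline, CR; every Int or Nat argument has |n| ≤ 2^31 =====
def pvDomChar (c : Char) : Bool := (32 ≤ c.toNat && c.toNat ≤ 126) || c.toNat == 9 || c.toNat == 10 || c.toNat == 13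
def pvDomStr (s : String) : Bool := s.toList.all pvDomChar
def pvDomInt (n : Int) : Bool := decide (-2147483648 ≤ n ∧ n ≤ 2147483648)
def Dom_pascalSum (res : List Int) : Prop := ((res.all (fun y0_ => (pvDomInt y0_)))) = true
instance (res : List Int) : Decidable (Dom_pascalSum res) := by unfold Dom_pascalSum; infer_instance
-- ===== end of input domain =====

-- B replaces A's O(n^2) repeated adjacent-sum collapse by one O(n) pass over the closed
-- form sum_i C(n-1,i)*res[i]; Pre_ excludes [] (A loops forever there).

-- ===== PORT A =====
-- inner 'for i in range(len(res)-1): temp.append(res[i]+res[i+1])'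
def pascalStep (res : List Int) : List Int :=
  (PySem.List.pyRange 0 ((res.length : Int) - 1) 1).foldl
    (fun temp i => temp ++ [PySem.List.pyGetD res i 0 + PySem.List.pyGetD res (i + 1) 0]) []

-- the 'while len(res) != 1' loop; fuel = initial length suffices (length drops by 1 each pass)
def pascalLoop : Nat → List Int → Int
  | 0, res => PySem.List.pyGetD res 0 0
  | fuel + 1, res =>
    if res.length = 1 then PySem.List.pyGetD res 0 0
    else pascalLoop fuel (pascalStep res)

def pascalSum (res : List Int) : Int := pascalLoop res.length res

-- ===== PORT B =====
def pascalSum_alt (res : List Int) : Int :=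
  let n : Int := res.length
  ((PySem.List.enumerate res).foldl
    (fun (st : Int × Int) (p : Int × Int) =>
      (st.1 + st.2 * p.2, PySem.Int.floordiv (st.2 * (n - 1 - p.1)) (p.1 + 1)))
    (0, 1)).1

-- ===== PRECONDITION & SPEC =====
-- Pre_ excludes exactly the empty list: there A's while-loop never terminates (len([]) ≠ 1 forever).
def Pre_pascalSum (res : List Int) : Prop := res ≠ []
instance (res : List Int) : Decidable (Pre_pascalSum res) := by unfold Pre_pascalSum; infer_instance
def pvWitness_pascalSum : List Int := [1, 2, 3]

def Spec_pascalSum (res : List Int) (out : Int) : Prop := out = pascalSum_alt res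
instance (res : List Int) (out : Int) : Decidable (Spec_pascalSum res out) := by unfold Spec_pascalSum; infer_instance

-- ===== CLAIM (what is proved, stated in full; the proofs are below) =====
def Claim_equal_pascalSum : Prop := ∀ (res : List Int), Dom_pascalSum res → Pre_pascalSum res → Spec_pascalSum res (pascalSum res)

-- ===== LEMMAS AND PROOFS =====

-- weighted sum with binomial coefficients: Wgo m k l = sum_i C(m, k+i) * l[i]
def Wgo (m : Nat) : Nat → List Int → Int
  | _, [] => 0
  | k, a :: t => (m.choose k : Int) * a + Wgo m (k + 1) t

lemma Wgo_pascal (t : List Int) : ∀ m k, Wgo m (k + 1) t + Wgo m k t = Wgo (m + 1) (k + 1) t := by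
  induction t with
  | nil => intro m k; simp [Wgo]
  | cons b t ih =>
    intro m k
    simp only [Wgo, Nat.choose_succ_succ]
    have := ih m (k + 1)
    push_cast
    linarith

lemma Wgo_zip : ∀ (t : List Int) (a : Int) (m k : Nat), m < k + t.length →
    Wgo m k (List.zipWith (· + ·) (a :: t) t)
      = (m.choose k : Int) * a + Wgo m (k + 1) t + Wgo m k t := by
  intro t
  induction t with
  | nil =>
    intro a m k h
    simp only [List.length_nil, Nat.add_zero] at h
    simp [Wgo, Nat.choose_eq_zero_of_lt h]
  | cons b t ih =>
    intro a m k h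
    have h' : m < (k + 1) + t.length := by simp at h ⊢; omega
    simp only [List.zipWith_cons_cons, Wgo]
    rw [ih b m (k + 1) h']
    ring

lemma pascalStep_eq_zip (res : List Int) :
    pascalStep res = List.zipWith (· + ·) res res.tail := by
  unfold pascalStep
  rw [PySem.List.foldl_append_singleton_eq_map, PySem.List.pyRange_one]
  have hlen : (((res.length : Int) - 1) - 0).toNat = res.length - 1 := by omega
  rw [hlen]
  apply List.ext_getElem
  · simp [List.length_zipWith]
  · intro i h1 h2
    simp only [List.nil_append, List.map_map, List.length_map, List.length_range] at h1
    simp only [List.nil_append, List.map_map, List.getElem_map, List.getElem_range,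
      Function.comp_apply, zero_add]
    have e2 : (i : Int) + 1 = (((i + 1 : Nat)) : Int) := by push_cast; ring
    rw [e2, PySem.List.pyGetD_natCast, PySem.List.pyGetD_natCast]
    rw [List.getD_eq_getElem _ _ (by omega), List.getD_eq_getElem _ _ (by omega),
      List.getElem_zipWith, List.getElem_tail]

lemma pascalStep_length (res : List Int) : (pascalStep res).length = res.length - 1 := by
  rw [pascalStep_eq_zip]
  cases res with
  | nil => simp
  | cons a t => simp [List.length_zipWith]

lemma Wgo_step (res : List Int) (h : 2 ≤ res.length) :
    Wgo (res.length - 2) 0 (pascalStep res) = Wgo (res.length - 1) 0 res := by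
  cases res with
  | nil => simp at h
  | cons a t =>
    rw [pascalStep_eq_zip]
    simp only [List.tail_cons, List.length_cons]
    have ht : 1 ≤ t.length := by simp at h; omega
    have hm : (t.length + 1) - 2 < 0 + t.length := by omega
    rw [Wgo_zip t a _ 0 hm, add_assoc, Wgo_pascal t ((t.length + 1) - 2) 0]
    have h2 : (t.length + 1) - 2 + 1 = (t.length + 1) - 1 := by omega
    rw [h2]
    simp [Wgo]

lemma pascalLoop_eq_Wgo : ∀ (fuel : Nat) (res : List Int), res ≠ [] → res.length ≤ fuel →
    pascalLoop fuel res = Wgo (res.length - 1) 0 res := by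
  intro fuel
  induction fuel with
  | zero =>
    intro res hne hlen
    exact absurd (List.length_eq_zero_iff.mp (by omega)) hne
  | succ fuel ih =>
    intro res hne hlen
    by_cases h1 : res.length = 1
    · obtain ⟨a, rfl⟩ : ∃ a, res = [a] := by
        cases res with
        | nil => simp at h1
        | cons a t =>
          have ht : t = [] := by simpa using h1
          exact ⟨a, by rw [ht]⟩
      simp [pascalLoop, Wgo, PySem.List.pyGetD_zero_cons]
    · have h2 : 2 ≤ res.length := by
        have : res.length ≠ 0 := by simpa [List.length_eq_zero_iff] using hne
        omega
      have hstep := pascalStep_length res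
      have hne' : pascalStep res ≠ [] := by
        intro hc
        have := congrArg List.length hc
        simp [hstep] at this
        omega
      simp only [pascalLoop, if_neg h1]
      rw [ih (pascalStep res) hne' (by omega), hstep]
      have : res.length - 1 - 1 = res.length - 2 := by omega
      rw [this, Wgo_step res h2]

lemma foldInv (n : Nat) : ∀ (l : List Int) (k : Nat) (tot : Int), k + l.length = n →
    ((PySem.List.enumerate l (k : Int)).foldl
      (fun (st : Int × Int) (p : Int × Int) =>
        (st.1 + st.2 * p.2, PySem.Int.floordiv (st.2 * ((n : Int) - 1 - p.1)) (p.1 + 1)))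
      (tot, ((n - 1).choose k : Int))).1 = tot + Wgo (n - 1) k l := by
  intro l
  induction l with
  | nil => intro k tot h; simp [PySem.List.enumerate_nil, Wgo]
  | cons a t ih =>
    intro k tot h
    have hk : k < n := by simp at h; omega
    rw [PySem.List.enumerate_cons]
    simp only [List.foldl_cons]
    have hc : PySem.Int.floordiv (((n - 1).choose k : Int) * ((n : Int) - 1 - (k : Int))) ((k : Int) + 1)
        = ((n - 1).choose (k + 1) : Int) := by
      have hcast : ((n : Int) - 1 - (k : Int)) = ((n - 1 - k : Nat) : Int) := by omega
      rw [hcast]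
      have : (((n - 1).choose k : Int)) * ((n - 1 - k : Nat) : Int)
          = (((n - 1).choose k * (n - 1 - k) : Nat) : Int) := by push_cast; ring
      rw [this]
      have : ((k : Int) + 1) = ((k + 1 : Nat) : Int) := by push_cast; ring
      rw [this, PySem.Int.floordiv_natCast]
      congr 1
      have hch : (n - 1).choose (k + 1) * (k + 1) = (n - 1).choose k * (n - 1 - k) :=
        Nat.choose_succ_right_eq (n - 1) k
      rw [← hch, Nat.mul_div_cancel _ (Nat.succ_pos k)]
    have hs : ((k : Int) + 1) = (((k + 1 : Nat)) : Int) := by push_cast; ring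
    rw [hc]
    rw [show (k : Int) + 1 = ((k + 1 : Nat) : Int) by push_cast; ring]
    rw [ih (k + 1) (tot + ((n - 1).choose k : Int) * a) (by simp at h ⊢; omega)]
    simp [Wgo]
    ring

lemma pascalSum_alt_eq_Wgo (res : List Int) :
    pascalSum_alt res = Wgo (res.length - 1) 0 res := by
  unfold pascalSum_alt
  have h := foldInv res.length res 0 0 (by simp)
  simp only [Nat.cast_zero, Nat.choose_zero_right, Nat.cast_one, zero_add] at h ⊢
  exact h

-- ===== VERDICT (by name: the statement is the Claim_ definition above) =====
theorem pascalSum_spec : Claim_equal_pascalSum := by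
  intro res _ hpre
  unfold Spec_pascalSum
  unfold pascalSum
  rw [pascalLoop_eq_Wgo res.length res hpre (le_refl _), pascalSum_alt_eq_Wgo]
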